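-- pv_equiv track=rewrite | github.com/khw5123/Project | Algorithm/Programmers/지형 이동.py | solution
-- ===== SOURCE A (Python) =====
-- def find(a, li):
--     if a == li[a]:
--         return a
--     else:
--         li[a] = find(li[a], li)
--         return li[a]
--
-- def union(a, b, li):
--     a, b = find(a, li), find(b, li)
--     if a == b:
--         return False
--     else:
--         li[a] = b
--         return True
--
-- def solution(land, height):
--     answer = 0
--     li = [i for i in range(len(land)*len(land[0])+1)]
--     edge = []
--     count = 1
--     for i in range(len(land)):
--         for j in range(len(land[0])):
--             if i == len(land)-1 and j == len(land[0])-1: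
--                 continue
--             else:
--                 if i == len(land)-1:
--                     edge.append([count, count+1, abs(land[i][j] - land[i][j+1])])
--                 elif j == len(land[0])-1:
--                     edge.append([count, count+len(land[0]), abs(land[i][j] - land[i+1][j])])
--                 else:
--                     edge.append([count, count+1, abs(land[i][j] - land[i][j+1])])
--                     edge.append([count, count+len(land[0]), abs(land[i][j] - land[i+1][j])])
--             count += 1
--     edge.sort(key=lambda x:x[2])
--     for i in range(len(edge)):
--         if union(edge[i][0], edge[i][1], li):
--             if edge[i][2] > height:
--                 answer += edge[i][2]
--     return answer
-- ===== SOURCE B (Python) =====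
-- def solution(land, height):
--     n, m = len(land), len(land[0])
--     flat = [h for row in land for h in row]
--     edges = []
--     for idx in range(n * m):
--         i, j = divmod(idx, m)
--         u = idx + 1
--         if j + 1 < m:
--             edges.append((u, u + 1, abs(flat[idx] - flat[idx + 1])))
--         if i + 1 < n:
--             edges.append((u, u + m, abs(flat[idx] - flat[idx + m])))
--     edges.sort(key=lambda e: e[2])
--     comp = list(range(n * m + 1))
--     total = 0
--     for u, v, w in edges:
--         cu, cv = comp[u], comp[v]
--         if cu != cv:
--             comp = [cv if c == cu else c for c in comp]
--             if w > height:
--                 total += w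
--     return total
-- ===== Notes on version B (the rewrite author's own statement) =====
-- stated objective: alternative
-- what changed: B drops the union-find entirely: it keeps the partition as an explicit component-label array and merges by relabeling one whole component, and it enumerates edges in one flat divmod pass instead of A's nested counter loops with a three-way branch chain.
-- outside the precondition, e.g. on solution([[0, 0], [5]], 0): A raises IndexError, B raises IndexError; on solution([[0], [100, 7], [3]], 0): A returns 197, B returns 193
import Mathlib
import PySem

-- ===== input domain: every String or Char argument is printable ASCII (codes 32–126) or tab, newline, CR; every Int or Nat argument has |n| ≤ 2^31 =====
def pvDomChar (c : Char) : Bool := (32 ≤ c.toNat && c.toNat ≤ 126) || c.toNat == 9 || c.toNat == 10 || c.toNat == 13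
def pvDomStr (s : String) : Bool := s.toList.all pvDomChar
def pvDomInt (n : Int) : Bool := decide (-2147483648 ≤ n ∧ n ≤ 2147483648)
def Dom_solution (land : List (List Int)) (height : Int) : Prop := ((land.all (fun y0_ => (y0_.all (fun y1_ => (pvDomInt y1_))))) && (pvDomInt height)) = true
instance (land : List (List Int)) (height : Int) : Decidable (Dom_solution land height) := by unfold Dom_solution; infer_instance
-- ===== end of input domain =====

-- B re-implements A's edge-sorting MST without a union-find: the partition is kept as an explicit
-- component-label array merged by relabeling, and edges come from one flat divmod pass instead of
-- A's nested counter loops; equal return value (alternative decomposition, not claimed faster).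

-- ===== PORT A =====
-- A's recursive `find` with path compression; Python recursion is guarded here by fuel (totality
-- only; never exhausted on the forests the algorithm builds).
def findA : Nat → Int → List Int → Int × List Int
  | 0, a, li => (a, li)
  | fuel+1, a, li =>
    match PySem.List.pyGet? li a with
    | none => (a, li)          -- Python would raise IndexError; unreachable on A's own states
    | some pa =>
      if a = pa then (a, li)
      else
        let r := findA fuel pa li
        (r.1, PySem.List.pySetD r.2 a r.1)

def unionA (fuel : Nat) (a b : Int) (li : List Int) : Bool × List Int :=
  let fa := findA fuel a li
  let fb := findA fuel b fa.2
  if fa.1 = fb.1 then (false, fb.2)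
  else (true, PySem.List.pySetD fb.2 fa.1 fb.1)

-- body of A's inner `for j in range(len(land[0]))` loop, state = (edge, count)
def innerBodyA (land : List (List Int)) (n m i : Int)
    (st : List (Int × Int × Int) × Int) (j : Int) : List (Int × Int × Int) × Int :=
  if i = n - 1 ∧ j = m - 1 then st
  else
    let edge := st.1
    let count := st.2
    let e' :=
      if i = n - 1 then
        edge ++ [(count, count + 1,
          |PySem.List.pyGetD (PySem.List.pyGetD land i []) j 0 -
           PySem.List.pyGetD (PySem.List.pyGetD land i []) (j+1) 0|)]
      else if j = m - 1 then
        edge ++ [(count, count + m,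
          |PySem.List.pyGetD (PySem.List.pyGetD land i []) j 0 -
           PySem.List.pyGetD (PySem.List.pyGetD land (i+1) []) j 0|)]
      else
        (edge ++ [(count, count + 1,
          |PySem.List.pyGetD (PySem.List.pyGetD land i []) j 0 -
           PySem.List.pyGetD (PySem.List.pyGetD land i []) (j+1) 0|)]) ++
         [(count, count + m,
          |PySem.List.pyGetD (PySem.List.pyGetD land i []) j 0 -
           PySem.List.pyGetD (PySem.List.pyGetD land (i+1) []) j 0|)]
    (e', count + 1)

def solution (land : List (List Int)) (height : Int) : Int :=
  let n : Int := land.length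
  let m : Int := ((PySem.List.pyGet? land 0).getD []).length
  let li : List Int := PySem.List.pyRange 0 (n * m + 1)
  let st := (PySem.List.pyRange 0 n).foldl
    (fun st i => (PySem.List.pyRange 0 m).foldl (innerBodyA land n m i) st)
    (([] : List (Int × Int × Int)), (1 : Int))
  let edges := PySem.List.sorted st.1 (fun e => e.2.2) false
  let fin := edges.foldl (fun (s : Int × List Int) e =>
    let r := unionA s.2.length e.1 e.2.1 s.2
    if r.1 then
      if e.2.2 > height then (s.1 + e.2.2, r.2) else (s.1, r.2)
    else (s.1, r.2)) ((0 : Int), li)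
  fin.1

-- ===== PORT B =====
-- body of B's single `for idx in range(n*m)` edge loop
def bodyB (flat : List Int) (n m : Int) (edges : List (Int × Int × Int)) (idx : Int) :
    List (Int × Int × Int) :=
  let ij := (PySem.Int.divmod? idx m).getD (0, 0)
  let u := idx + 1
  let e1 := if ij.2 + 1 < m then
      edges ++ [(u, u + 1, |PySem.List.pyGetD flat idx 0 - PySem.List.pyGetD flat (idx+1) 0|)]
    else edges
  if ij.1 + 1 < n then
    e1 ++ [(u, u + m, |PySem.List.pyGetD flat idx 0 - PySem.List.pyGetD flat (idx+m) 0|)]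
  else e1

def solution_alt (land : List (List Int)) (height : Int) : Int :=
  let n : Int := land.length
  let m : Int := ((PySem.List.pyGet? land 0).getD []).length
  let flat : List Int := land.flatMap (fun row => row)
  let edges := (PySem.List.pyRange 0 (n * m)).foldl (bodyB flat n m) []
  let sortedE := PySem.List.sorted edges (fun e => e.2.2) false
  let comp : List Int := PySem.List.pyRange 0 (n * m + 1)
  let fin := sortedE.foldl (fun (s : Int × List Int) e =>
    let cu := PySem.List.pyGetD s.2 e.1 0
    let cv := PySem.List.pyGetD s.2 e.2.1 0
    if cu ≠ cv then
      ((if e.2.2 > height then s.1 + e.2.2 else s.1),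
       s.2.map (fun c => if c = cu then cv else c))
    else s) ((0 : Int), comp)
  fin.1

-- ===== PRECONDITION & SPEC =====
-- Pre_ excludes the empty grid (A raises IndexError on land[0]) and essentially non-rectangular
-- grids: on a row shorter than land[0] both A and B raise IndexError, and on other ragged grids A
-- silently reads cells by row index while B (like any natural implementation) indexes a flattened
-- rectangular grid. (Still admitted: an empty first row, and a last row longer than the first —
-- there the ragged part is never read and both programs agree.)
def Pre_solution (land : List (List Int)) (height : Int) : Prop :=
  land ≠ [] ∧
    ((land.headD []).length = 0 ∨
      ((∀ row ∈ land.dropLast, row.length = (land.headD []).length) ∧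
       (land.headD []).length ≤ (land.getLastD []).length))
instance (land : List (List Int)) (height : Int) : Decidable (Pre_solution land height) := by
  unfold Pre_solution; infer_instance

def pvWitness_solution : List (List Int) × Int := ([[1, 3], [2, 10]], 2)

def Spec_solution (land : List (List Int)) (height : Int) (out : Int) : Prop := out = solution_alt land height
instance (land : List (List Int)) (height : Int) (out : Int) : Decidable (Spec_solution land height out) := by unfold Spec_solution; infer_instance

-- ===== CLAIM (what is proved, stated in full; the proofs are below) =====
def Claim_equal_solution : Prop := ∀ (land : List (List Int)) (height : Int), Dom_solution land height → Pre_solution land height → Spec_solution land height (solution land height)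

-- ===== LEMMAS AND PROOFS =====

-- ---- semantic view of A's parent array: parent pointer, fuelled root, iterated parent ----
def parentOf (li : List Int) (a : Int) : Int := PySem.List.pyGetD li a 0

def rootN : Nat → List Int → Int → Option Int
  | 0, _, _ => none
  | f+1, li, a => if parentOf li a = a then some a else rootN f li (parentOf li a)

-- all entries in range (A's parent arrays always satisfy this)
def ER (li : List Int) : Prop :=
  ∀ a : Int, 0 ≤ a → a < li.length → 0 ≤ parentOf li a ∧ parentOf li a < li.length

def iterP (li : List Int) : Nat → Int → Int
  | 0, a => a
  | k+1, a => iterP li k (parentOf li a)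

theorem rootN_mono (li : List Int) : ∀ (f g : Nat) (a r : Int), f ≤ g →
    rootN f li a = some r → rootN g li a = some r := by
  intro f
  induction f with
  | zero => intro g a r _ h; simp [rootN] at h
  | succ f ih =>
    intro g a r hfg h
    obtain ⟨g', rfl⟩ : ∃ g', g = g' + 1 := ⟨g - 1, by omega⟩
    simp only [rootN] at h ⊢
    split at h
    · rename_i hfix
      rw [if_pos hfix]
      exact h
    · rename_i hne
      rw [if_neg hne]
      exact ih g' _ _ (by omega) h

theorem rootN_root (li : List Int) : ∀ (f : Nat) (a r : Int), rootN f li a = some r → parentOf li r = r := by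
  intro f
  induction f with
  | zero => intro a r h; simp [rootN] at h
  | succ f ih =>
    intro a r h
    simp only [rootN] at h
    split at h
    · rename_i hfix
      injection h with h; subst h; exact hfix
    · exact ih _ _ h

theorem rootN_range (li : List Int) (hER : ER li) : ∀ (f : Nat) (a r : Int), 0 ≤ a → a < li.length →
    rootN f li a = some r → 0 ≤ r ∧ r < li.length := by
  intro f
  induction f with
  | zero => intro a r _ _ h; simp [rootN] at h
  | succ f ih =>
    intro a r h0 hl h
    simp only [rootN] at h
    split at h
    · injection h with h; subst h; exact ⟨h0, hl⟩
    · exact ih _ _ (hER a h0 hl).1 (hER a h0 hl).2 h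

theorem rootN_iterP (li : List Int) : ∀ (f : Nat) (a r : Int), rootN f li a = some r →
    ∃ k, k < f ∧ iterP li k a = r := by
  intro f
  induction f with
  | zero => intro a r h; simp [rootN] at h
  | succ f ih =>
    intro a r h
    simp only [rootN] at h
    split at h
    · injection h with h
      exact ⟨0, by omega, h⟩
    · obtain ⟨k, hk, hit⟩ := ih _ _ h
      exact ⟨k+1, by omega, by simpa [iterP] using hit⟩

theorem iterP_fix (li : List Int) (a : Int) (hfix : parentOf li a = a) :
    ∀ k, iterP li k a = a := by
  intro k
  induction k with
  | zero => rfl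
  | succ k ih => simp [iterP, hfix, ih]

theorem iterP_add (li : List Int) : ∀ (j k : Nat) (a : Int), iterP li (j + k) a = iterP li k (iterP li j a) := by
  intro j
  induction j with
  | zero => intro k a; rw [Nat.zero_add]; rfl
  | succ j ih =>
    intro k a
    rw [show j + 1 + k = (j + k) + 1 by omega]
    show iterP li (j + k) (parentOf li a) = _
    rw [ih]
    rfl

theorem iterP_succ' (li : List Int) (k : Nat) (a : Int) :
    iterP li (k + 1) a = parentOf li (iterP li k a) := by
  have h := iterP_add li k 1 a
  simpa [iterP] using h

theorem iterP_range (li : List Int) (hER : ER li) :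
    ∀ (k : Nat) (a : Int), 0 ≤ a → a < li.length → 0 ≤ iterP li k a ∧ iterP li k a < li.length := by
  intro k
  induction k with
  | zero => intro a h0 hl; exact ⟨h0, hl⟩
  | succ k ih =>
    intro a h0 hl
    have := hER a h0 hl
    exact ih _ this.1 this.2

theorem iterP_rootN (li : List Int) : ∀ (k : Nat) (a r : Int), parentOf li r = r → iterP li k a = r →
    rootN (k+1) li a = some r := by
  intro k
  induction k with
  | zero =>
    intro a r hfix hit
    simp only [iterP] at hit
    subst hit
    simp [rootN, hfix]
  | succ k ih =>
    intro a r hfix hit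
    by_cases hpa : parentOf li a = a
    · rw [iterP_fix li a hpa] at hit
      subst hit
      simp [rootN, hpa]
    · simp only [rootN, if_neg hpa]
      exact ih _ _ hfix hit

-- fuel compression: if the root is reachable at all, fuel = length suffices (the visited chain
-- is repetition-free, hence at most `length` nodes long)
theorem rootN_len (li : List Int) (hER : ER li) (a r : Int) (f : Nat)
    (h0 : 0 ≤ a) (hl : a < li.length) (h : rootN f li a = some r) :
    rootN li.length li a = some r := by
  obtain ⟨k, _, hit⟩ := rootN_iterP li f a r h
  have hfix : parentOf li r = r := rootN_root li f a r h
  have hex : ∃ k, iterP li k a = r := ⟨k, hit⟩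
  have hit0 : iterP li (Nat.find hex) a = r := Nat.find_spec hex
  set k0 := Nat.find hex with hk0
  have hmin : ∀ j, j < k0 → iterP li j a ≠ r := fun j hj => Nat.find_min hex hj
  have hinj : Set.InjOn (fun j => iterP li j a) (Finset.range (k0+1)) := by
    intro i hi j hj heq
    simp only [Finset.coe_range, Set.mem_Iio] at hi hj
    replace heq : iterP li i a = iterP li j a := heq
    by_contra hne
    rcases Nat.lt_or_ge i j with hij | hij
    · have h1 : iterP li (i + (k0 - j)) a = r := by
        rw [iterP_add, heq, ← iterP_add, show j + (k0 - j) = k0 by omega, hit0]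
      exact hmin _ (by omega) h1
    · have hij' : j < i := by omega
      have h1 : iterP li (j + (k0 - i)) a = r := by
        rw [iterP_add, ← heq, ← iterP_add, show i + (k0 - i) = k0 by omega, hit0]
      exact hmin _ (by omega) h1
  have hmaps : ∀ j ∈ Finset.range (k0+1), iterP li j a ∈ Finset.Ico (0:Int) li.length := by
    intro j _
    have := iterP_range li hER j a h0 hl
    simp only [Finset.mem_Ico]
    exact this
  have hcard := Finset.card_le_card_of_injOn (fun j => iterP li j a) hmaps hinj
  rw [Finset.card_range, Int.card_Ico] at hcard
  have hk0len : k0 + 1 ≤ li.length := by omega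
  exact rootN_mono li (k0+1) li.length a r hk0len (iterP_rootN li k0 a r hfix hit0)

theorem parentOf_set (li : List Int) (a v x : Int) (ha0 : 0 ≤ a) (hal : a < li.length) (hx : 0 ≤ x) :
    parentOf (li.set a.toNat v) x = if x = a then v else parentOf li x := by
  unfold parentOf
  rw [PySem.List.pyGetD_of_nonneg _ _ hx, PySem.List.pyGetD_of_nonneg _ _ hx]
  by_cases hxa : x = a
  · subst hxa
    rw [if_pos rfl]
    have hx' : x.toNat < li.length := by omega
    rw [List.getD_eq_getElem _ _ (by simpa using hx'), List.getElem_set_self]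
  · rw [if_neg hxa]
    rcases Nat.lt_or_ge x.toNat li.length with hlt | hge
    · rw [List.getD_eq_getElem _ _ (by simpa using hlt),
        List.getD_eq_getElem _ _ hlt,
        List.getElem_set_ne (by omega)]
    · rw [List.getD_eq_default _ _ (by simpa using hge), List.getD_eq_default _ _ hge]

theorem ER_set (li : List Int) (hER : ER li) (a v : Int)
    (ha0 : 0 ≤ a) (hal : a < li.length) (hv0 : 0 ≤ v) (hvl : v < li.length) :
    ER (li.set a.toNat v) := by
  intro x hx0 hxl
  rw [List.length_set] at hxl
  rw [parentOf_set li a v x ha0 hal hx0, List.length_set]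
  by_cases hxa : x = a
  · rw [if_pos hxa]; exact ⟨hv0, hvl⟩
  · rw [if_neg hxa]; exact hER x hx0 hxl

-- repointing a node of known root directly to that root preserves every root
theorem rootN_set_path (li : List Int) (hER : ER li) (a r : Int)
    (h0 : 0 ≤ a) (hl : a < li.length) (fa : Nat) (ha : rootN fa li a = some r) :
    ∀ (f : Nat) (b rb : Int), 0 ≤ b → b < li.length → rootN f li b = some rb →
      rootN f (li.set a.toNat r) b = some rb := by
  intro f
  induction f with
  | zero => intro b rb _ _ h; simp [rootN] at h
  | succ f ih =>
    intro b rb hb0 hbl h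
    simp only [rootN] at h ⊢
    by_cases hba : b = a
    · subst hba
      have hrb : rb = r := by
        have h1 : rootN (f+1) li b = some rb := by
          simp only [rootN]
          exact h
        have h2 := rootN_mono li fa (max (f+1) fa) b r (le_max_right _ _) ha
        have h3 := rootN_mono li (f+1) (max (f+1) fa) b rb (le_max_left _ _) h1
        rw [h3] at h2
        exact (Option.some.inj h2)
      subst hrb
      rw [parentOf_set li b rb b hb0 hl hb0, if_pos rfl]
      by_cases hra : rb = b
      · simp [hra]
      · rw [if_neg hra]
        have hfixb : ¬ parentOf li b = b := by
          intro hfix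
          rw [if_pos hfix] at h
          injection h with h
          exact hra h.symm
        rw [if_neg hfixb] at h
        obtain ⟨f', rfl⟩ : ∃ f', f = f' + 1 := by
          rcases f with _ | f
          · simp [rootN] at h
          · exact ⟨f, rfl⟩
        have hr0 : 0 ≤ rb ∧ rb < li.length := by
          refine rootN_range li hER (f'+2) b rb hb0 hbl ?_
          simp only [rootN]
          rw [if_neg hfixb]
          exact h
        have hrfix : parentOf (li.set b.toNat rb) rb = rb := by
          rw [parentOf_set li b rb rb hb0 hl hr0.1, if_neg hra]
          exact rootN_root li fa b rb ha
        simp [rootN, hrfix]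
    · rw [parentOf_set li a r b h0 hl hb0, if_neg hba]
      split at h
      · rename_i hfix
        rw [if_pos hfix]
        exact h
      · rename_i hfix
        rw [if_neg hfix]
        exact ih _ _ (hER b hb0 hbl).1 (hER b hb0 hbl).2 h

theorem pyGet?_parentOf (li : List Int) (a : Int) (h0 : 0 ≤ a) (hl : a < li.length) :
    PySem.List.pyGet? li a = some (parentOf li a) := by
  rw [PySem.List.pyGet?_eq_some_getElem li h0 hl]
  unfold parentOf
  rw [PySem.List.pyGetD_of_nonneg _ _ h0, List.getD_eq_getElem _ _ (by omega)]

theorem findA_spec (li : List Int) (hER : ER li) : ∀ (f : Nat) (a r : Int),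
    0 ≤ a → a < li.length → rootN f li a = some r →
    (findA f a li).1 = r ∧ (findA f a li).2.length = li.length ∧ ER (findA f a li).2 ∧
    (∀ (g : Nat) (b rb : Int), 0 ≤ b → b < li.length → rootN g li b = some rb →
      rootN g (findA f a li).2 b = some rb) := by
  intro f
  induction f with
  | zero => intro a r _ _ h; simp [rootN] at h
  | succ f ih =>
    intro a r h0 hl h
    have hget := pyGet?_parentOf li a h0 hl
    simp only [rootN] at h
    by_cases hfix : parentOf li a = a
    · rw [if_pos hfix] at h
      injection h with h
      subst h
      simp only [findA, hget, if_pos hfix.symm]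
      exact ⟨trivial, trivial, hER, fun g b rb _ _ hb => hb⟩
    · rw [if_neg hfix] at h
      have hpa := hER a h0 hl
      obtain ⟨ih1, ih2, ih3, ih4⟩ := ih (parentOf li a) r hpa.1 hpa.2 h
      · have hfix' : ¬ a = parentOf li a := fun hc => hfix hc.symm
        have hA : rootN (f+1) li a = some r := by
          simp only [rootN]; rw [if_neg hfix]; exact h
        have hA' : rootN (f+1) (findA f (parentOf li a) li).2 a = some r :=
          ih4 (f+1) a r h0 hl hA
        have hr : 0 ≤ r ∧ r < li.length := rootN_range li hER (f+1) a r h0 hl hA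
        simp only [findA, hget, if_neg hfix', ih1]
        refine ⟨trivial, ?_, ?_, ?_⟩
        · rw [PySem.List.pySetD_of_nonneg _ _ h0, List.length_set, ih2]
        · rw [PySem.List.pySetD_of_nonneg _ _ h0]
          exact ER_set _ ih3 a r h0 (by omega) hr.1 (by omega)
        · intro g b rb hb0 hbl hb
          rw [PySem.List.pySetD_of_nonneg _ _ h0]
          exact rootN_set_path _ ih3 a r h0 (by omega) (f+1) hA' g b rb hb0 (by omega)
            (ih4 g b rb hb0 hbl hb)
  -- remaining goals of `obtain … := ih …`: argument order
  -- (handled positionally above)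

-- linking one root under another changes exactly the roots equal to it
theorem rootN_link (li : List Int) (hER : ER li) (x y : Int)
    (hx0 : 0 ≤ x) (hxl : x < li.length) (hy0 : 0 ≤ y) (hyl : y < li.length)
    (hfx : parentOf li x = x) (hfy : parentOf li y = y) (hxy : x ≠ y)
    (b rb : Int) (hb0 : 0 ≤ b) (hbl : b < li.length)
    (hb : rootN li.length li b = some rb) :
    rootN (li.set x.toNat y).length (li.set x.toNat y) b = some (if rb = x then y else rb) := by
  have hER' : ER (li.set x.toNat y) := ER_set li hER x y hx0 hxl hy0 hyl
  obtain ⟨k, _, hit⟩ := rootN_iterP li li.length b rb hb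
  have hfixb : parentOf li rb = rb := rootN_root li li.length b rb hb
  have hlen : (li.set x.toNat y).length = li.length := List.length_set ..
  have hcopy : ∀ J : Nat, (∀ j, j < J → iterP li j b ≠ x) →
      iterP (li.set x.toNat y) J b = iterP li J b := by
    intro J
    induction J with
    | zero => intro _; rfl
    | succ J ihJ =>
      intro hne
      rw [iterP_succ', iterP_succ', ihJ (fun j hj => hne j (by omega))]
      have hnn := iterP_range li hER J b hb0 hbl
      rw [parentOf_set li x y _ hx0 hxl hnn.1, if_neg (hne J (by omega))]
  rw [hlen]
  by_cases hrx : rb = x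
  · subst hrx
    rw [if_pos rfl]
    have hex : ∃ j, iterP li j b = rb := ⟨k, hit⟩
    have hit0 : iterP li (Nat.find hex) b = rb := Nat.find_spec hex
    set j0 := Nat.find hex with hj0
    have hmin : ∀ j, j < j0 → iterP li j b ≠ rb := fun j hj => Nat.find_min hex hj
    have h1 : iterP (li.set rb.toNat y) j0 b = rb := by
      rw [hcopy j0 hmin]; exact hit0
    have h2 : iterP (li.set rb.toNat y) (j0+1) b = y := by
      rw [iterP_succ', h1, parentOf_set li rb y rb hx0 hxl hx0, if_pos rfl]
    have h3 : parentOf (li.set rb.toNat y) y = y := by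
      rw [parentOf_set li rb y y hx0 hxl hy0, if_neg (fun hc => hxy hc.symm)]
      exact hfy
    have h4 := iterP_rootN (li.set rb.toNat y) (j0+1) b y h3 h2
    have := rootN_len _ hER' b y (j0+2) hb0 (by rw [hlen]; exact hbl) h4
    rw [hlen] at this
    exact this
  · rw [if_neg hrx]
    have hne : ∀ j, j < k → iterP li j b ≠ x := by
      intro j hj hc
      apply hrx
      have hsplit : iterP li (j + (k - j)) b = rb := by
        rw [show j + (k - j) = k by omega]; exact hit
      rw [iterP_add, hc, iterP_fix li x hfx] at hsplit
      exact hsplit.symm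
    have h1 : iterP (li.set x.toNat y) k b = rb := by
      rw [hcopy k hne]; exact hit
    have h3 : parentOf (li.set x.toNat y) rb = rb := by
      rw [parentOf_set li x y rb hx0 hxl (rootN_range li hER li.length b rb hb0 hbl hb).1,
        if_neg hrx]
      exact hfixb
    have h4 := iterP_rootN (li.set x.toNat y) k b rb h3 h1
    have := rootN_len _ hER' b rb (k+1) hb0 (by rw [hlen]; exact hbl) h4
    rw [hlen] at this
    exact this

-- the full union step, phrased against the current root table R
theorem unionA_spec (li : List Int) (hER : ER li) (u v : Int) (R : Int → Int)
    (hu0 : 0 ≤ u) (hul : u < li.length) (hv0 : 0 ≤ v) (hvl : v < li.length)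
    (hR : ∀ b : Int, 0 ≤ b → b < li.length → rootN li.length li b = some (R b)) :
    (unionA li.length u v li).1 = decide (¬ R u = R v) ∧
    (unionA li.length u v li).2.length = li.length ∧ ER (unionA li.length u v li).2 ∧
    (∀ b : Int, 0 ≤ b → b < li.length →
      rootN li.length (unionA li.length u v li).2 b
        = some (if ¬ R u = R v ∧ R b = R u then R v else R b)) := by
  obtain ⟨fa1, fa2, fa3, fa4⟩ := findA_spec li hER li.length u (R u) hu0 hul (hR u hu0 hul)
  set liA := (findA li.length u li).2 with hliA
  have hRA : ∀ b : Int, 0 ≤ b → b < liA.length → rootN liA.length liA b = some (R b) := by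
    intro b hb0 hbl
    rw [fa2] at hbl ⊢
    exact fa4 li.length b (R b) hb0 hbl (hR b hb0 hbl)
  have hERA : ER liA := fa3
  obtain ⟨fb1, fb2, fb3, fb4⟩ := findA_spec liA hERA liA.length v (R v) hv0
    (by rw [fa2]; exact hvl) (hRA v hv0 (by rw [fa2]; exact hvl))
  set liB := (findA liA.length v liA).2 with hliB
  have hlenB : liB.length = li.length := by rw [fb2, fa2]
  have hRB : ∀ b : Int, 0 ≤ b → b < li.length → rootN liB.length liB b = some (R b) := by
    intro b hb0 hbl
    rw [hlenB, ← fa2]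
    exact fb4 liA.length b (R b) hb0 (by rw [fa2]; exact hbl)
      (hRA b hb0 (by rw [fa2]; exact hbl))
  -- the two find calls inside unionA: note the fuel there is li.length = liA.length
  have hfuel : liA.length = li.length := fa2
  have hu1 : (findA li.length u li).1 = R u := fa1
  have hv1 : (findA li.length v liA).1 = R v := by
    rw [← hfuel]; exact fb1
  have hliB' : (findA li.length v liA).2 = liB := by rw [hliB, hfuel]
  have hun : unionA li.length u v li
      = (if R u = R v then (false, liB)
         else (true, PySem.List.pySetD liB (R u) (R v))) := by
    show (if (findA li.length u li).1 = (findA li.length v (findA li.length u li).2).1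
        then (false, (findA li.length v (findA li.length u li).2).2)
        else (true, PySem.List.pySetD (findA li.length v (findA li.length u li).2).2
               (findA li.length u li).1 (findA li.length v (findA li.length u li).2).1)) = _
    rw [← hliA, hliB', hu1, hv1]
  rw [hun]
  by_cases hEq : R u = R v
  · rw [if_pos hEq]
    simp only [hEq]
    refine ⟨by simp, hlenB, fb3, ?_⟩
    intro b hb0 hbl
    rw [if_neg (by simp)]
    have := hRB b hb0 hbl
    rw [hlenB] at this
    exact this
  · rw [if_neg hEq]
    have hru := rootN_range li hER li.length u (R u) hu0 hul (hR u hu0 hul)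
    have hrv := rootN_range li hER li.length v (R v) hv0 hvl (hR v hv0 hvl)
    have hfxu : parentOf liB (R u) = R u :=
      rootN_root liB liB.length u (R u) (hRB u hu0 hul)
    have hfxv : parentOf liB (R v) = R v :=
      rootN_root liB liB.length v (R v) (hRB v hv0 hvl)
    have hset : PySem.List.pySetD liB (R u) (R v) = liB.set (R u).toNat (R v) :=
      PySem.List.pySetD_of_nonneg _ _ hru.1
    simp only [hset]
    have hlenset : (liB.set (R u).toNat (R v)).length = li.length := by
      rw [List.length_set, hlenB]
    refine ⟨by simp [hEq], hlenset, ?_, ?_⟩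
    · exact ER_set liB fb3 (R u) (R v) hru.1 (by omega) hrv.1 (by omega)
    · intro b hb0 hbl
      have hlink := rootN_link liB fb3 (R u) (R v) hru.1 (by omega) hrv.1 (by omega)
        hfxu hfxv hEq b (R b) hb0 (by rw [hlenB]; exact hbl) (hRB b hb0 hbl)
      rw [List.length_set, hlenB] at hlink
      have hcond : (if ¬ R u = R v ∧ R b = R u then R v else R b)
          = (if R b = R u then R v else R b) := by
        by_cases hbu : R b = R u <;> simp [hbu, hEq]
      rw [hcond]
      show rootN li.length (liB.set (R u).toNat (R v)) b = _
      exact hlink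

-- ---- the invariant tying A's parent array to B's label array, and the main fold ----
def InvUF (N : Nat) (li comp : List Int) : Prop :=
  li.length = N ∧ comp.length = N ∧ ER li ∧
  ∀ b : Int, 0 ≤ b → b < (N:Int) → rootN N li b = some (PySem.List.pyGetD comp b 0)

theorem pyGetD_map_in (f : Int → Int) (xs : List Int) (b : Int) (d d' : Int)
    (h0 : 0 ≤ b) (hl : b < xs.length) :
    PySem.List.pyGetD (xs.map f) b d = f (PySem.List.pyGetD xs b d') := by
  rw [PySem.List.pyGetD_of_nonneg _ _ h0, PySem.List.pyGetD_of_nonneg _ _ h0]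
  rw [List.getD_eq_getElem _ _ (by simp; omega), List.getD_eq_getElem _ _ (by omega)]
  simp

theorem fold_eq (height : Int) (N : Nat) :
    ∀ (es : List (Int × Int × Int)) (acc : Int) (li comp : List Int),
    InvUF N li comp →
    (∀ e ∈ es, (0 ≤ e.1 ∧ e.1 < (N:Int)) ∧ (0 ≤ e.2.1 ∧ e.2.1 < (N:Int))) →
    (es.foldl (fun (s : Int × List Int) e =>
        let r := unionA s.2.length e.1 e.2.1 s.2
        if r.1 then
          if e.2.2 > height then (s.1 + e.2.2, r.2) else (s.1, r.2)
        else (s.1, r.2)) (acc, li)).1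
      = (es.foldl (fun (s : Int × List Int) e =>
          let cu := PySem.List.pyGetD s.2 e.1 0
          let cv := PySem.List.pyGetD s.2 e.2.1 0
          if cu ≠ cv then
            ((if e.2.2 > height then s.1 + e.2.2 else s.1),
             s.2.map (fun c => if c = cu then cv else c))
          else s) (acc, comp)).1 := by
  intro es
  induction es with
  | nil => intro acc li comp _ _; rfl
  | cons e es ihes =>
    intro acc li comp hInv hb
    obtain ⟨hlen, hclen, hER, hR⟩ := hInv
    subst hlen
    obtain ⟨⟨hu0, hul⟩, ⟨hv0, hvl⟩⟩ := hb e (by simp)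
    set R : Int → Int := fun b => PySem.List.pyGetD comp b 0 with hRdef
    have hR' : ∀ b : Int, 0 ≤ b → b < li.length → rootN li.length li b = some (R b) := hR
    obtain ⟨w1, w2, w3, w4⟩ := unionA_spec li hER e.1 e.2.1 R hu0 hul hv0 hvl hR'
    have hcu : PySem.List.pyGetD comp e.1 0 = R e.1 := rfl
    have hcv : PySem.List.pyGetD comp e.2.1 0 = R e.2.1 := rfl
    simp only [List.foldl_cons]
    by_cases hEq : R e.1 = R e.2.1
    · -- no merge on either side
      have hA1 : (unionA li.length e.1 e.2.1 li).1 = false := by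
        rw [w1]; simp [hEq]
      have hstepB : (if PySem.List.pyGetD comp e.1 0 ≠ PySem.List.pyGetD comp e.2.1 0 then
          ((if e.2.2 > height then acc + e.2.2 else acc),
           comp.map (fun c => if c = PySem.List.pyGetD comp e.1 0
             then PySem.List.pyGetD comp e.2.1 0 else c))
          else (acc, comp)) = (acc, comp) := by
        rw [if_neg (by simp [hcu, hcv, hEq])]
      rw [hstepB]
      have hstepA : (let r := unionA li.length e.1 e.2.1 li;
          if r.1 then
            if e.2.2 > height then (acc + e.2.2, r.2) else (acc, r.2)
          else (acc, r.2)) = (acc, (unionA li.length e.1 e.2.1 li).2) := by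
        simp only [hA1, Bool.false_eq_true, if_false]
      simp only [hstepA]
      apply ihes
      · refine ⟨w2, hclen, w3, ?_⟩
        intro b hb0 hbl
        have := w4 b hb0 hbl
        rw [if_neg (by simp [hEq])] at this
        exact this
      · intro e' he'; exact hb e' (by simp [he'])
    · -- merge on both sides
      have hA1 : (unionA li.length e.1 e.2.1 li).1 = true := by
        rw [w1]; simp [hEq]
      have hcomp' : ∀ b : Int, 0 ≤ b → b < (li.length:Int) →
          PySem.List.pyGetD (comp.map (fun c => if c = R e.1 then R e.2.1 else c)) b 0
            = (if R b = R e.1 then R e.2.1 else R b) := by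
        intro b hb0 hbl
        rw [pyGetD_map_in _ comp b 0 0 hb0 (by rw [hclen]; exact_mod_cast hbl)]
      have hInv' : InvUF li.length (unionA li.length e.1 e.2.1 li).2
          (comp.map (fun c => if c = R e.1 then R e.2.1 else c)) := by
        refine ⟨w2, by simp [hclen], w3, ?_⟩
        intro b hb0 hbl
        have := w4 b hb0 hbl
        rw [hcomp' b hb0 hbl, this]
        by_cases hbu : R b = R e.1
        · simp [hbu, hEq]
        · simp [hbu, hEq]
      by_cases hw : e.2.2 > height
      · have hstepA : (let r := unionA li.length e.1 e.2.1 li;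
            if r.1 then
              if e.2.2 > height then (acc + e.2.2, r.2) else (acc, r.2)
            else (acc, r.2)) = (acc + e.2.2, (unionA li.length e.1 e.2.1 li).2) := by
          simp only [hA1, if_true, if_pos hw]
        have hstepB : (if PySem.List.pyGetD comp e.1 0 ≠ PySem.List.pyGetD comp e.2.1 0 then
            ((if e.2.2 > height then acc + e.2.2 else acc),
             comp.map (fun c => if c = PySem.List.pyGetD comp e.1 0
               then PySem.List.pyGetD comp e.2.1 0 else c))
            else (acc, comp))
            = (acc + e.2.2, comp.map (fun c => if c = R e.1 then R e.2.1 else c)) := by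
          rw [if_pos (by simp [hcu, hcv, hEq]), if_pos hw]
        simp only [hstepA, hstepB]
        exact ihes _ _ _ hInv' (fun e' he' => hb e' (by simp [he']))
      · have hstepA : (let r := unionA li.length e.1 e.2.1 li;
            if r.1 then
              if e.2.2 > height then (acc + e.2.2, r.2) else (acc, r.2)
            else (acc, r.2)) = (acc, (unionA li.length e.1 e.2.1 li).2) := by
          simp only [hA1, if_true, if_neg hw]
        have hstepB : (if PySem.List.pyGetD comp e.1 0 ≠ PySem.List.pyGetD comp e.2.1 0 then
            ((if e.2.2 > height then acc + e.2.2 else acc),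
             comp.map (fun c => if c = PySem.List.pyGetD comp e.1 0
               then PySem.List.pyGetD comp e.2.1 0 else c))
            else (acc, comp))
            = (acc, comp.map (fun c => if c = R e.1 then R e.2.1 else c)) := by
          rw [if_pos (by simp [hcu, hcv, hEq]), if_neg hw]
        simp only [hstepA, hstepB]
        exact ihes _ _ _ hInv' (fun e' he' => hb e' (by simp [he']))

theorem pyGetD_pyRange_self (k a : Int) (h0 : 0 ≤ a) (ha : a < k) :
    PySem.List.pyGetD (PySem.List.pyRange 0 k) a 0 = a := by
  rw [PySem.List.pyRange_one, PySem.List.pyGetD_of_nonneg _ _ h0]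
  rw [List.getD_eq_getElem _ _ (by simp; omega)]
  simp
  omega

theorem InvUF_init (k : Int) (hk : 0 < k) :
    InvUF (PySem.List.pyRange 0 k).length (PySem.List.pyRange 0 k) (PySem.List.pyRange 0 k) := by
  have hlen : ((PySem.List.pyRange 0 k).length : Int) = k := by
    rw [PySem.List.length_pyRange_one]; omega
  have hpar : ∀ a : Int, 0 ≤ a → a < k → parentOf (PySem.List.pyRange 0 k) a = a := by
    intro a h0 ha
    exact pyGetD_pyRange_self k a h0 ha
  refine ⟨rfl, rfl, ?_, ?_⟩
  · intro a h0 hl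
    rw [hpar a h0 (by omega)]
    exact ⟨h0, hl⟩
  · intro b hb0 hbl
    obtain ⟨N', hN'⟩ : ∃ N', (PySem.List.pyRange 0 k).length = N' + 1 := ⟨(PySem.List.pyRange 0 k).length - 1, by omega⟩
    rw [hN']
    simp only [rootN]
    rw [if_pos (hpar b hb0 (by omega))]
    rw [pyGetD_pyRange_self k b hb0 (by omega)]

-- ---- the common shape of one cell's edge group (shared by both edge builders) ----
def cellL (land : List (List Int)) (i j : Int) : Int :=
  PySem.List.pyGetD (PySem.List.pyGetD land i []) j 0

def grp (land : List (List Int)) (n m i j : Int) : List (Int × Int × Int) :=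
  (if j + 1 < m then [(i*m+j+1, i*m+j+1+1, |cellL land i j - cellL land i (j+1)|)] else []) ++
  (if i + 1 < n then [(i*m+j+1, i*m+j+1+m, |cellL land i j - cellL land (i+1) j|)] else [])

def gB (flat : List Int) (n m idx : Int) : List (Int × Int × Int) :=
  (if (((PySem.Int.divmod? idx m).getD (0,0)).2 + 1 < m) then
      [(idx+1, idx+1+1, |PySem.List.pyGetD flat idx 0 - PySem.List.pyGetD flat (idx+1) 0|)] else []) ++
  (if (((PySem.Int.divmod? idx m).getD (0,0)).1 + 1 < n) then
      [(idx+1, idx+1+m, |PySem.List.pyGetD flat idx 0 - PySem.List.pyGetD flat (idx+m) 0|)] else [])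

theorem innerRowA (land : List (List Int)) (n m i : Int) (hin : i < n) :
    ∀ (k : Nat) (j : Int), 0 ≤ j → j + k = m → ∀ (E : List (Int × Int × Int)),
    (PySem.List.pyRange j m).foldl (innerBodyA land n m i) (E, i*m+j+1)
      = (E ++ (PySem.List.pyRange j m).flatMap (fun j' => grp land n m i j'),
         if i = n - 1 ∧ 0 < k then i*m+m else i*m+m+1) := by
  intro k
  induction k with
  | zero =>
    intro j hj0 hjm E
    have h : j = m := by omega
    rw [PySem.List.pyRange_one_eq_nil (le_of_eq h.symm)]
    simp only [List.foldl_nil, List.flatMap_nil, List.append_nil]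
    rw [if_neg (by simp), h]
  | succ k ih =>
    intro j hj0 hjm E
    have hjlt : j < m := by omega
    rw [PySem.List.pyRange_one_cons hjlt]
    simp only [List.foldl_cons, List.flatMap_cons]
    by_cases hcor : i = n - 1 ∧ j = m - 1
    · have hk0 : k = 0 := by omega
      subst hk0
      have hrest : PySem.List.pyRange (j+1) m = ([] : List Int) := by
        apply PySem.List.pyRange_one_eq_nil; omega
      rw [innerBodyA, if_pos hcor, hrest]
      simp only [List.foldl_nil, List.flatMap_nil]
      have hg : grp land n m i j = [] := by
        unfold grp; rw [if_neg (by omega), if_neg (by omega)]; simp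
      rw [hg]
      simp only [List.append_nil]
      rw [if_pos ⟨hcor.1, by omega⟩]
      have : i * m + j + 1 = i * m + m := by omega
      rw [this]
    · have hstep : innerBodyA land n m i (E, i*m+j+1) j
          = (E ++ grp land n m i j, i*m+(j+1)+1) := by
        simp only [innerBodyA, if_neg hcor]
        unfold grp cellL
        split_ifs <;>
          first
          | (exfalso; omega)
          | (simp only [Prod.mk.injEq, List.append_assoc, List.append_nil, List.nil_append];
             refine ⟨by simp, by omega⟩)
      rw [hstep]
      rw [ih (j+1) (by omega) (by omega) (E ++ grp land n m i j)]
      simp only [List.append_assoc]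
      by_cases hi : i = n - 1
      · by_cases hk : 0 < k
        · rw [if_pos ⟨hi, hk⟩, if_pos ⟨hi, by omega⟩]
        · exfalso; omega
      · rw [if_neg (by tauto), if_neg (by tauto)]

theorem outerRowsA (land : List (List Int)) (n m : Int) (hm : 0 ≤ m) :
    ∀ (k : Nat) (i : Int), i + k = n - 1 → ∀ (E : List (Int × Int × Int)),
    (PySem.List.pyRange i (n-1)).foldl
        (fun st i' => (PySem.List.pyRange 0 m).foldl (innerBodyA land n m i') st) (E, i*m+1)
      = (E ++ (PySem.List.pyRange i (n-1)).flatMap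
            (fun i' => (PySem.List.pyRange 0 m).flatMap (fun j => grp land n m i' j)),
         (n-1)*m+1) := by
  intro k
  induction k with
  | zero =>
    intro i hik E
    have h : i = n - 1 := by omega
    rw [PySem.List.pyRange_one_eq_nil (le_of_eq h.symm)]
    simp only [List.foldl_nil, List.flatMap_nil, List.append_nil]
    rw [h]
  | succ k ih =>
    intro i hik E
    have hilt : i < n - 1 := by omega
    rw [PySem.List.pyRange_one_cons hilt]
    simp only [List.foldl_cons, List.flatMap_cons]
    have hrow := innerRowA land n m i (by omega) m.toNat 0 (le_refl 0) (by omega) E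
    have h01 : i*m+0+1 = i*m+1 := by ring
    rw [h01] at hrow
    rw [hrow, if_neg (by omega)]
    have h2 : i*m+m+1 = (i+1)*m+1 := by ring
    rw [h2, ih (i+1) (by omega)]
    simp only [List.append_assoc]

theorem edgesB_flatMap (flat : List Int) (n m : Int) (l : List Int) :
    l.foldl (bodyB flat n m) [] = l.flatMap (gB flat n m) := by
  have h : l.foldl (bodyB flat n m) [] = l.foldl (fun acc idx => acc ++ gB flat n m idx) [] := by
    apply PySem.List.foldl_congr_mem
    intro acc idx _
    simp only [bodyB, gB]
    split_ifs <;> simp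
  rw [h, PySem.List.foldl_append_eq_flatMap]
  simp

theorem pyRange_shift (a m : Int) :
    PySem.List.pyRange a (a + m) = (PySem.List.pyRange 0 m).map (fun k => a + k) := by
  rw [PySem.List.pyRange_one, PySem.List.pyRange_one]
  simp [List.map_map, Function.comp_def]

theorem flat_get (land : List (List Int)) (M : Nat)
    (hrect : ∀ row ∈ land.dropLast, row.length = M)
    (hlast : M ≤ (land.getLastD []).length) :
    ∀ (i j : Int), 0 ≤ i → i < land.length → 0 ≤ j → j < M →
    PySem.List.pyGetD (land.flatMap (fun row => row)) (i*M+j) 0 = cellL land i j := by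
  induction land with
  | nil => intro i j h1 h2; simp at h2; omega
  | cons r t ih =>
    intro i j hi0 hin hj0 hjM
    have hrM : (M:Int) ≤ r.length := by
      cases t with
      | nil => simpa using hlast
      | cons s t' =>
        have : r ∈ (r :: s :: t').dropLast := by simp [List.dropLast_cons_of_ne_nil]
        rw [hrect r this]
    by_cases hi : i = 0
    · subst hi
      simp only [List.flatMap_cons, cellL]
      rw [show (0:Int)*M+j = j by ring]
      rw [PySem.List.pyGetD_of_nonneg _ _ hj0, PySem.List.pyGetD_of_nonneg _ _ (by norm_num : (0:Int) ≤ 0)]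
      rw [List.getD_append _ _ _ _ (by omega)]
      simp [PySem.List.pyGetD_of_nonneg _ _ hj0]
    · have hi1 : 1 ≤ i := by omega
      have ht : t ≠ [] := by
        cases t with
        | nil => simp at hin; omega
        | cons s t' => simp
      obtain ⟨s, t', rfl⟩ := List.exists_cons_of_ne_nil ht
      have hrMe : r.length = M := by
        have : r ∈ (r :: s :: t').dropLast := by simp [List.dropLast_cons_of_ne_nil]
        exact hrect r this
      have hb0 : 0 ≤ (i-1)*(M:Int)+j := by
        have := mul_nonneg (by omega : (0:Int) ≤ i - 1) (by positivity : (0:Int) ≤ (M:Int))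
        omega
      have hab : i*(M:Int)+j = ((i-1)*(M:Int)+j) + M := by ring
      simp only [List.flatMap_cons, cellL]
      rw [PySem.List.pyGetD_of_nonneg _ _ (by omega : (0:Int) ≤ i*M+j)]
      rw [List.getD_append_right _ _ _ _ (by omega)]
      rw [show (i*(M:Int)+j).toNat - r.length = ((i-1)*(M:Int)+j).toNat by omega]
      have hrect' : ∀ row ∈ (s :: t').dropLast, row.length = M := by
        intro row hrow
        apply hrect
        simp [List.dropLast_cons_of_ne_nil]
        right; exact hrow
      have hlast' : M ≤ ((s :: t').getLastD []).length := by
        simpa [List.getLastD_cons] using hlast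
      have iht := ih hrect' hlast' (i-1) j (by omega) (by simp at hin ⊢; omega) hj0 hjM
      rw [PySem.List.pyGetD_of_nonneg _ _ hb0] at iht
      unfold cellL at iht
      simp only [List.flatMap_cons] at iht
      rw [iht]
      congr 1
      rw [PySem.List.pyGetD_of_nonneg _ _ hi0, PySem.List.pyGetD_of_nonneg _ _ (by omega : (0:Int) ≤ i - 1)]
      rw [show i.toNat = (i-1).toNat + 1 by omega, List.getD_cons_succ]

theorem gB_eq_grp (land : List (List Int)) (M : Nat) (n m i j : Int)
    (hrect : ∀ row ∈ land.dropLast, row.length = M)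
    (hlast : M ≤ (land.getLastD []).length)
    (hM : m = (M:Int)) (hn : n = (land.length : Int))
    (hi0 : 0 ≤ i) (hin : i < n) (hj0 : 0 ≤ j) (hjm : j < m) :
    gB (land.flatMap (fun row => row)) n m (i*m+j) = grp land n m i j := by
  have hm0 : m ≠ 0 := by omega
  have hdm : PySem.Int.divmod? (i*m+j) m = some (i, j) := by
    have hfd : PySem.Int.floordiv (i*m+j) m = i := by
      rw [PySem.Int.floordiv_eq_iff_of_pos (by omega)]
      constructor
      · nlinarith
      · nlinarith
    have hmd : PySem.Int.mod (i*m+j) m = j := by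
      have := PySem.Int.floordiv_mul_add_mod (i*m+j) m
      rw [hfd] at this
      omega
    simp only [PySem.Int.divmod?, hm0]
    simp only [PySem.Int.floordiv] at hfd
    simp only [PySem.Int.mod] at hmd
    simp [hfd, hmd]
  have hget : ∀ (i' j' : Int), 0 ≤ i' → i' < n → 0 ≤ j' → j' < m →
      PySem.List.pyGetD (land.flatMap (fun row => row)) (i'*m+j') 0 = cellL land i' j' := by
    intro i' j' a b c d
    subst hM hn
    exact flat_get land M hrect hlast i' j' a (by exact_mod_cast b) c (by exact_mod_cast d)
  unfold gB grp
  rw [hdm]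
  simp only [Option.getD_some]
  congr 1
  · by_cases h : j + 1 < m
    · rw [if_pos h, if_pos h]
      have e1 := hget i j hi0 hin hj0 hjm
      have e2 := hget i (j+1) hi0 hin (by omega) h
      rw [show i*m+(j+1) = i*m+j+1 by ring] at e2
      rw [e1, e2]
    · rw [if_neg h, if_neg h]
  · by_cases h : i + 1 < n
    · rw [if_pos h, if_pos h]
      have e1 := hget i j hi0 hin hj0 hjm
      have e2 := hget (i+1) j (by omega) h hj0 hjm
      rw [show (i+1)*m+j = i*m+j+m by ring] at e2
      rw [e1, e2]
    · rw [if_neg h, if_neg h]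

theorem B_rows (flat : List Int) (n m : Int) (hm : 0 ≤ m) :
    ∀ (k : Nat),
    (PySem.List.pyRange 0 ((k:Int)*m)).flatMap (gB flat n m)
      = (PySem.List.pyRange 0 (k:Int)).flatMap
          (fun i => (PySem.List.pyRange 0 m).flatMap (fun j => gB flat n m (i*m+j))) := by
  intro k
  induction k with
  | zero => simp [PySem.List.pyRange_one_eq_nil]
  | succ k ih =>
    have hk0 : (0:Int) ≤ (k:Int)*m := by positivity
    have hc : ((k+1:Nat):Int) = (k:Int)+1 := by push_cast; ring
    rw [hc]
    rw [show ((k:Int)+1)*m = (k:Int)*m + m by ring]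
    rw [PySem.List.pyRange_one_append 0 ((k:Int)*m) ((k:Int)*m+m) hk0 (by omega)]
    rw [PySem.List.pyRange_one_append 0 (k:Int) ((k:Int)+1) (by positivity) (by omega)]
    rw [List.flatMap_append, List.flatMap_append, ih]
    congr 1
    rw [PySem.List.pyRange_one_singleton]
    rw [pyRange_shift ((k:Int)*m) m, List.flatMap_map]
    simp

theorem flatMap_congr_mem {α β : Type} (l : List α) (f g : α → List β)
    (h : ∀ x ∈ l, f x = g x) : l.flatMap f = l.flatMap g := by
  induction l with
  | nil => rfl
  | cons a t ih =>
    simp only [List.flatMap_cons]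
    rw [h a (by simp), ih (fun x hx => h x (by simp [hx]))]

theorem edges_eq (land : List (List Int)) (hne : land ≠ [])
    (hrect : ∀ row ∈ land.dropLast, row.length = (land.headD []).length)
    (hlast : (land.headD []).length ≤ (land.getLastD []).length) :
    ((PySem.List.pyRange 0 (land.length : Int)).foldl
        (fun st i => (PySem.List.pyRange 0 ((((PySem.List.pyGet? land 0).getD []).length : Int))).foldl
          (innerBodyA land (land.length : Int) ((((PySem.List.pyGet? land 0).getD []).length : Int)) i) st)
        (([] : List (Int × Int × Int)), (1 : Int))).1
    = (PySem.List.pyRange 0 ((land.length : Int) * (((PySem.List.pyGet? land 0).getD []).length : Int))).foldl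
        (bodyB (land.flatMap (fun row => row)) (land.length : Int)
          ((((PySem.List.pyGet? land 0).getD []).length : Int))) [] := by
  obtain ⟨r, t, rfl⟩ := List.exists_cons_of_ne_nil hne
  rw [PySem.List.pyGet?_zero_cons]
  simp only [Option.getD_some]
  set n : Int := ((r :: t).length : Int) with hn
  set m : Int := (r.length : Int) with hm
  have hn1 : 1 ≤ n := by rw [hn]; simp
  have hm0 : 0 ≤ m := by rw [hm]; positivity
  have hout := outerRowsA (r::t) n m hm0 (n-1).toNat 0 (by omega) ([])
  rw [show (0:Int)*m+1 = 1 by ring] at hout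
  have hinn := innerRowA (r::t) n m (n-1) (by omega) m.toNat 0 (le_refl 0) (by omega)
      ((PySem.List.pyRange 0 (n-1)).flatMap
        (fun i => (PySem.List.pyRange 0 m).flatMap (fun j => grp (r::t) n m i j)))
  rw [show (n-1)*m+0+1 = (n-1)*m+1 by ring] at hinn
  have hA : ((PySem.List.pyRange 0 n).foldl
      (fun st i => (PySem.List.pyRange 0 m).foldl (innerBodyA (r::t) n m i) st)
      (([] : List (Int × Int × Int)), (1 : Int))).1
      = (PySem.List.pyRange 0 n).flatMap
          (fun i => (PySem.List.pyRange 0 m).flatMap (fun j => grp (r::t) n m i j)) := by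
    rw [PySem.List.pyRange_one_append 0 (n-1) n (by omega) (by omega)]
    rw [List.foldl_append, List.flatMap_append, hout]
    rw [show PySem.List.pyRange (n-1) n = [n-1] by
      have := PySem.List.pyRange_one_singleton (n-1); rw [show (n-1)+1 = n by ring] at this; exact this]
    simp only [List.foldl_cons, List.foldl_nil, List.flatMap_cons, List.flatMap_nil,
      List.append_nil, List.nil_append]
    rw [hinn]
  rw [hA]
  rw [edgesB_flatMap]
  have hNM : n * m = (((r::t).length : Nat) : Int) * m := by rw [hn]
  rw [hNM, B_rows _ n m hm0 (r::t).length, ← hn]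
  apply flatMap_congr_mem
  intro i hi
  apply flatMap_congr_mem
  intro j hj
  rw [PySem.List.mem_pyRange_one] at hi hj
  exact (gB_eq_grp (r::t) r.length n m i j
    (by intro row hrow; have := hrect row hrow; simpa using this)
    (by simpa using hlast)
    hm hn hi.1 hi.2 hj.1 hj.2).symm

-- every generated edge's endpoints lie in [0, n*m]
theorem gB_bounds (flat : List Int) (n m idx : Int) (hm : 0 < m)
    (h0 : 0 ≤ idx) (hlt : idx < n*m) :
    ∀ e ∈ gB flat n m idx, (0 ≤ e.1 ∧ e.1 < n*m+1) ∧ (0 ≤ e.2.1 ∧ e.2.1 < n*m+1) := by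
  intro e he
  have hm0 : m ≠ 0 := by omega
  have hdm : (PySem.Int.divmod? idx m).getD (0,0)
      = (PySem.Int.floordiv idx m, PySem.Int.mod idx m) := by
    simp [PySem.Int.divmod?, hm0, PySem.Int.floordiv, PySem.Int.mod]
  unfold gB at he
  rw [hdm] at he
  have hsum := PySem.Int.floordiv_mul_add_mod idx m
  have hj0 : 0 ≤ PySem.Int.mod idx m := PySem.Int.mod_nonneg idx hm
  have hjm : PySem.Int.mod idx m < m := PySem.Int.mod_lt idx hm
  have hilt : PySem.Int.floordiv idx m < n := by
    rw [PySem.Int.floordiv_lt_iff_lt_mul hm]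
    nlinarith
  have hi0 : 0 ≤ PySem.Int.floordiv idx m := by
    rw [PySem.Int.le_floordiv_iff_mul_le hm]
    omega
  set i := PySem.Int.floordiv idx m
  set j := PySem.Int.mod idx m
  rw [List.mem_append] at he
  rcases he with he | he
  · split at he
    · rename_i hcond
      simp only [List.mem_singleton] at he
      subst he
      simp only
      have : idx + 1 < i*m + m := by omega
      have h2 : i*m + m ≤ n*m := by nlinarith
      refine ⟨⟨by omega, by omega⟩, ⟨by omega, by omega⟩⟩
    · simp at he
  · split at he
    · rename_i hcond
      simp only [List.mem_singleton] at he
      subst he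
      simp only
      have h2 : idx + 1 + m ≤ n*m := by nlinarith
      refine ⟨⟨by omega, by omega⟩, ⟨by omega, by omega⟩⟩
    · simp at he

theorem solution_eq (land : List (List Int)) (height : Int)
    (hne : land ≠ [])
    (hrect : ∀ row ∈ land.dropLast, row.length = (land.headD []).length)
    (hlast : (land.headD []).length ≤ (land.getLastD []).length) :
    solution land height = solution_alt land height := by
  simp only [solution, solution_alt]
  rw [edges_eq land hne hrect hlast]
  set n : Int := (land.length : Int) with hn
  set m : Int := (((PySem.List.pyGet? land 0).getD []).length : Int) with hm
  have hn1 : 1 ≤ n := by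
    rw [hn]
    have := List.length_pos_iff.mpr hne
    omega
  have hm0 : 0 ≤ m := by rw [hm]; positivity
  set flat : List Int := land.flatMap (fun row => row) with hflat
  set edges := (PySem.List.pyRange 0 (n * m)).foldl (bodyB flat n m) [] with hedges
  set sortedE := PySem.List.sorted edges (fun e => e.2.2) false with hsorted
  set N : Nat := (PySem.List.pyRange 0 (n * m + 1)).length with hN
  have hNval : (N:Int) = n*m+1 := by
    rw [hN, PySem.List.length_pyRange_one]
    have : (0:Int) ≤ n*m := by positivity
    omega
  have hbounds : ∀ e ∈ sortedE, (0 ≤ e.1 ∧ e.1 < (N:Int)) ∧ (0 ≤ e.2.1 ∧ e.2.1 < (N:Int)) := by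
    intro e he
    rw [hsorted, PySem.List.mem_sorted] at he
    rw [hedges, edgesB_flatMap] at he
    rw [List.mem_flatMap] at he
    obtain ⟨idx, hidx, hein⟩ := he
    rw [PySem.List.mem_pyRange_one] at hidx
    have hmpos : 0 < m := by
      rcases lt_or_eq_of_le hm0 with h | h
      · exact h
      · exfalso; rw [← h] at hidx; simp at hidx; omega
    have := gB_bounds flat n m idx hmpos hidx.1 hidx.2 e hein
    rw [hNval]
    exact this
  exact fold_eq height N sortedE 0 _ _
    (InvUF_init (n*m+1) (by
      have h : (0:Int) ≤ n*m := by positivity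
      omega)) hbounds

theorem solution_m0 (land : List (List Int)) (height : Int)
    (hm : ((((PySem.List.pyGet? land 0).getD []).length : Nat) : Int) = 0) :
    solution land height = 0 ∧ solution_alt land height = 0 := by
  constructor
  · simp only [solution, hm]
    rw [PySem.List.pyRange_one_eq_nil (le_refl (0:Int))]
    simp only [List.foldl_nil, PySem.List.foldl_ignore]
    rw [(PySem.List.sorted_eq_nil_iff _ _ _).mpr rfl]
    simp
  · simp only [solution_alt, hm]
    rw [show (land.length : Int) * 0 = 0 by ring]
    rw [PySem.List.pyRange_one_eq_nil (le_refl (0:Int))]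
    simp only [List.foldl_nil]
    rw [(PySem.List.sorted_eq_nil_iff _ _ _).mpr rfl]
    simp

-- ===== VERDICT (by name: the statement is the Claim_ definition above) =====
theorem solution_spec : Claim_equal_solution := by
  intro land height _ hpre
  unfold Pre_solution at hpre
  unfold Spec_solution
  obtain ⟨hne, hcase⟩ := hpre
  rcases hcase with hm | ⟨hrect, hlast⟩
  · obtain ⟨r, t, rfl⟩ := List.exists_cons_of_ne_nil hne
    have hm' : ((((PySem.List.pyGet? (r::t) 0).getD []).length : Nat) : Int) = 0 := by
      rw [PySem.List.pyGet?_zero_cons]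
      simpa using hm
    obtain ⟨hA, hB⟩ := solution_m0 (r::t) height hm'
    rw [hA, hB]
  · exact solution_eq land height hne hrect hlast
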